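-- pv_equiv track=rewrite | github.com/Ogekuri/useReq | tests/project_examples/toMarkdown/latex.py | _iter_chars
-- ===== SOURCE A (Python) =====
-- from typing import Iterable
--
-- def _iter_chars(content: str) -> Iterable[str]:
--     """!@brief Iterate expression tokens preserving ``\\left``/``\\right``.
--     @details Scans input string and emits control tokens as atomic units to
--     preserve delimiter semantics for stack-based validation.
--     @param content {str} LaTeX expression without outer markdown delimiters.
--     @return {Iterable[str]} Ordered token stream used by delimiter checks.
--     """
--
--     i = 0
--     while i < len(content):
--         if content.startswith(r"\left", i):
--             yield r"\left"
--             i += 5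
--             continue
--         if content.startswith(r"\right", i):
--             yield r"\right"
--             i += 6
--             continue
--         yield content[i]
--         i += 1
-- ===== SOURCE B (Python) =====
-- from typing import Iterable
--
-- def _iter_chars(content: str) -> Iterable[str]:
--     """Tokenize from the RIGHT: peel tokens off the end of the string,
--     collecting them back-to-front, then yield them in order."""
--     tokens = []
--     while content:
--         if content.endswith("\\left"):
--             tokens.append("\\left")
--             content = content[:-5]
--         elif content.endswith("\\right"):
--             tokens.append("\\right")
--             content = content[:-6]
--         else:
--             tokens.append(content[-1])
--             content = content[:-1]
--     yield from reversed(tokens)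
-- ===== Notes on version B (the rewrite author's own statement) =====
-- stated objective: alternative
-- what changed: B tokenizes the string from the right end, peeling \left/\right or a single character off the end and reversing the collected tokens, instead of A's forward index scan with startswith lookahead.
import Mathlib
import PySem

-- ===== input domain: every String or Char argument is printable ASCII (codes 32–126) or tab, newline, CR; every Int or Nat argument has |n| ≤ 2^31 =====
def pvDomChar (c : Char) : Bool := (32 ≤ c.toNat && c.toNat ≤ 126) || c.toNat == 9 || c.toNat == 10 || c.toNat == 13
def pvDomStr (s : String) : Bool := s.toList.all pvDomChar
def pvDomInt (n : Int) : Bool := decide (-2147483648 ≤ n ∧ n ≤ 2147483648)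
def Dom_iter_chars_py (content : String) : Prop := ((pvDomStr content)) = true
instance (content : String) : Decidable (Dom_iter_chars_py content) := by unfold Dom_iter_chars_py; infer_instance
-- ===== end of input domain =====

-- B tokenizes from the right end (peeling \left/\right or one char off the end, reversing at the close) instead of A's forward index scan; objective: alternative (same cost, different traversal).

def leftTok : List Char := ['\\', 'l', 'e', 'f', 't']
def rightTok : List Char := ['\\', 'r', 'i', 'g', 'h', 't']

-- ===== PORT A =====
-- forward scan: check "content.startswith('\left', i)", then "\right", else emit one char;
-- the startswith tests at index i are the first two patterns, advancing i is recursing on the rest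
def iterCharsGo : List Char → List String
  | '\\' :: 'l' :: 'e' :: 'f' :: 't' :: rest => "\\left" :: iterCharsGo rest
  | '\\' :: 'r' :: 'i' :: 'g' :: 'h' :: 't' :: rest => "\\right" :: iterCharsGo rest
  | c :: rest => String.ofList [c] :: iterCharsGo rest
  | [] => []

def iter_chars_py (content : String) : List String := iterCharsGo content.toList

-- ===== PORT B =====
-- backward while-loop (fuel = remaining length bounds the iterations; each pass shortens the string):
-- peel "\left"/"\right"/one char off the END, appending tokens; caller reverses
def iterCharsAltGo (fuel : Nat) (l : List Char) (tokens : List String) : List String :=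
  match fuel, l with
  | _, [] => tokens
  | 0, _ :: _ => tokens    -- never reached: fuel starts at the string length
  | fuel + 1, a :: rest =>
    if PySem.Chars.endswith (a :: rest) leftTok then
      iterCharsAltGo fuel (PySem.List.slice (a :: rest) none (some (-5))) (tokens ++ ["\\left"])
    else if PySem.Chars.endswith (a :: rest) rightTok then
      iterCharsAltGo fuel (PySem.List.slice (a :: rest) none (some (-6))) (tokens ++ ["\\right"])
    else
      match PySem.List.pyGet? (a :: rest) (-1) with
      | some ch => iterCharsAltGo fuel (PySem.List.slice (a :: rest) none (some (-1))) (tokens ++ [String.ofList [ch]])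
      | none => tokens    -- unreachable: the list is nonempty, so content[-1] exists

def iter_chars_py_alt (content : String) : List String :=
  (iterCharsAltGo content.toList.length content.toList []).reverse

-- ===== PRECONDITION & SPEC =====
def Spec_iter_chars_py (content : String) (out : List String) : Prop := out = iter_chars_py_alt content
instance (content : String) (out : List String) : Decidable (Spec_iter_chars_py content out) := by unfold Spec_iter_chars_py; infer_instance

-- ===== CLAIM (what is proved, stated in full; the proofs are below) =====
def Claim_equal_iter_chars_py : Prop := ∀ (content : String), Dom_iter_chars_py content → Spec_iter_chars_py content (iter_chars_py content)

-- ===== LEMMAS AND PROOFS =====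

-- a slice content[:-k] is a take
theorem pvSliceNegTake {α : Type} (l : List α) (k : Int) (hk : 1 ≤ k) :
    PySem.List.slice l none (some (-k)) = l.take (l.length - k.toNat) := by
  simp only [PySem.List.slice, PySem.List.clampIdx]
  split_ifs with h1 h2 <;> simp <;> omega

-- content[:-k] with the last k chars being a known suffix s leaves exactly the prefix
theorem pvSliceOfSuffix {α : Type} (x s : List α) (k : Int) (hk : k.toNat = s.length) (h1 : 1 ≤ k) :
    PySem.List.slice (x ++ s) none (some (-k)) = x := by
  rw [pvSliceNegTake _ _ h1, hk]
  simp [List.take_left']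

-- one forward step of A for each of the three branches
theorem pvStepLeft (t : List Char) : iterCharsGo (leftTok ++ t) = "\\left" :: iterCharsGo t := rfl

theorem pvStepRight (t : List Char) : iterCharsGo (rightTok ++ t) = "\\right" :: iterCharsGo t := rfl

theorem pvStepChar (c : Char) (rest : List Char)
    (hL : ¬ leftTok <+: c :: rest) (hR : ¬ rightTok <+: c :: rest) :
    iterCharsGo (c :: rest) = String.ofList [c] :: iterCharsGo rest := by
  rw [iterCharsGo.eq_def]
  split
  · rename_i r heq
    exact absurd ⟨r, by rw [heq]; simp [leftTok]⟩ hL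
  · rename_i r heq
    exact absurd ⟨r, by rw [heq]; simp [rightTok]⟩ hR
  · rename_i c' r heq
    injection heq with h1 h2
    rw [h1, h2]
  · rename_i heq
    exact absurd heq (by simp)

-- one backward step of B for each of the three branches
theorem pvAltStepLeft (fuel : Nat) (a : Char) (rest : List Char) (tokens : List String)
    (h : PySem.Chars.endswith (a :: rest) leftTok = true) :
    iterCharsAltGo (fuel + 1) (a :: rest) tokens
      = iterCharsAltGo fuel (PySem.List.slice (a :: rest) none (some (-5))) (tokens ++ ["\\left"]) := by
  rw [iterCharsAltGo, if_pos h]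

theorem pvAltStepRight (fuel : Nat) (a : Char) (rest : List Char) (tokens : List String)
    (h1 : PySem.Chars.endswith (a :: rest) leftTok = false)
    (h2 : PySem.Chars.endswith (a :: rest) rightTok = true) :
    iterCharsAltGo (fuel + 1) (a :: rest) tokens
      = iterCharsAltGo fuel (PySem.List.slice (a :: rest) none (some (-6))) (tokens ++ ["\\right"]) := by
  rw [iterCharsAltGo, if_neg (by simp [h1]), if_pos h2]

theorem pvAltStepChar (fuel : Nat) (a : Char) (rest : List Char) (tokens : List String) (ch : Char)
    (h1 : PySem.Chars.endswith (a :: rest) leftTok = false)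
    (h2 : PySem.Chars.endswith (a :: rest) rightTok = false)
    (hget : PySem.List.pyGet? (a :: rest) (-1) = some ch) :
    iterCharsAltGo (fuel + 1) (a :: rest) tokens
      = iterCharsAltGo fuel (PySem.List.slice (a :: rest) none (some (-1))) (tokens ++ [String.ofList [ch]]) := by
  rw [iterCharsAltGo, if_neg (by simp [h1]), if_neg (by simp [h2]), hget]

-- both tokens carry '\\' only at position 0
theorem pvLeftNoBS : ∀ i, 1 ≤ i → ∀ (h : i < leftTok.length), leftTok[i] ≠ '\\' := by
  intro i h1 h2
  simp only [leftTok, List.length_cons, List.length_nil] at h2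
  interval_cases i <;> simp [leftTok]

theorem pvRightNoBS : ∀ i, 1 ≤ i → ∀ (h : i < rightTok.length), rightTok[i] ≠ '\\' := by
  intro i h1 h2
  simp only [rightTok, List.length_cons, List.length_nil] at h2
  interval_cases i <;> simp [rightTok]

-- a token prefix of x ++ y cannot cross the boundary when y starts with '\\'
theorem pvPrefixBoundary (pat x y : List Char)
    (hpat : ∀ i, 1 ≤ i → ∀ (h : i < pat.length), pat[i] ≠ '\\')
    (hx : x ≠ []) (hy : y.head? = some '\\')
    (h : pat <+: x ++ y) : pat <+: x := by
  by_cases hle : pat.length ≤ x.length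
  · exact List.prefix_of_prefix_length_le h (x.prefix_append y) hle
  · exfalso
    rw [Nat.not_le] at hle
    cases y with
    | nil => simp at hy
    | cons y0 ytl =>
      have hy0 : y0 = '\\' := by simpa using hy
      have hxl : 1 ≤ x.length := List.length_pos_iff.mpr hx
      have hbound : x.length < (x ++ y0 :: ytl).length := by simp
      have hidx : pat[x.length]'hle = (x ++ y0 :: ytl)[x.length]'hbound := h.getElem hle
      have hgy : (x ++ y0 :: ytl)[x.length]'hbound = y0 := by
        rw [List.getElem_append_right (le_refl x.length)]
        simp
      exact hpat x.length hxl hle (by rw [hidx, hgy, hy0])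

-- scanning x ++ y splits when y is empty or starts with '\\'
theorem pvGoAppend (y : List Char) (hy : y = [] ∨ y.head? = some '\\') :
    ∀ n x, x.length = n → iterCharsGo (x ++ y) = iterCharsGo x ++ iterCharsGo y := by
  intro n
  induction n using Nat.strong_induction_on with
  | _ n ih =>
    intro x hn
    rcases hy with hy | hy
    · subst hy; simp [iterCharsGo]
    match x with
    | [] => simp [iterCharsGo]
    | c :: xs =>
      have hne : (c :: xs) ≠ [] := by simp
      by_cases hL : leftTok <+: (c :: xs)
      · obtain ⟨t, ht⟩ := hL
        rw [← ht, List.append_assoc, pvStepLeft, pvStepLeft]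
        have hlt : t.length < n := by
          rw [← hn, ← ht]
          simp only [List.length_append, leftTok, List.length_cons, List.length_nil]
          omega
        rw [ih t.length hlt t rfl]
        simp
      · by_cases hR : rightTok <+: (c :: xs)
        · obtain ⟨t, ht⟩ := hR
          rw [← ht, List.append_assoc, pvStepRight, pvStepRight]
          have hlt : t.length < n := by
            rw [← hn, ← ht]
            simp only [List.length_append, rightTok, List.length_cons, List.length_nil]
            omega
          rw [ih t.length hlt t rfl]
          simp
        · have hnL1 : ¬ leftTok <+: (c :: xs) ++ y := fun hp =>
            hL (pvPrefixBoundary leftTok (c :: xs) y pvLeftNoBS hne hy hp)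
          have hnR1 : ¬ rightTok <+: (c :: xs) ++ y := fun hp =>
            hR (pvPrefixBoundary rightTok (c :: xs) y pvRightNoBS hne hy hp)
          rw [List.cons_append,
              pvStepChar c (xs ++ y) (by rwa [← List.cons_append]) (by rwa [← List.cons_append]),
              pvStepChar c xs hL hR]
          have hlt : xs.length < n := by rw [← hn]; simp
          rw [ih xs.length hlt xs rfl]
          simp

-- a token prefix reaching the last element of x ++ [c] would be a suffix
theorem pvPrefixSnoc (pat x : List Char) (c : Char)
    (hns : ¬ pat <:+ x ++ [c]) (h : pat <+: x ++ [c]) : pat <+: x := by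
  by_cases hle : pat.length ≤ x.length
  · exact List.prefix_of_prefix_length_le h (x.prefix_append [c]) hle
  · exfalso
    have hl : pat.length ≤ x.length + 1 := by
      have := h.length_le; simpa using this
    have hpe : pat = x ++ [c] := List.IsPrefix.eq_of_length h (by simp; omega)
    exact hns (hpe ▸ List.suffix_refl _)

-- appending a final char that completes no token appends one single-char token
theorem pvGoSnoc (c : Char) :
    ∀ n x, x.length = n → ¬ leftTok <:+ x ++ [c] → ¬ rightTok <:+ x ++ [c] →
      iterCharsGo (x ++ [c]) = iterCharsGo x ++ [String.ofList [c]] := by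
  intro n
  induction n using Nat.strong_induction_on with
  | _ n ih =>
    intro x hn hsl hsr
    match x with
    | [] =>
      rw [List.nil_append,
          pvStepChar c []
            (by intro h; have := h.length_le; simp [leftTok] at this)
            (by intro h; have := h.length_le; simp [rightTok] at this)]
      simp [iterCharsGo]
    | a :: xs =>
      by_cases hL : leftTok <+: (a :: xs)
      · obtain ⟨t, ht⟩ := hL
        rw [← ht, List.append_assoc, pvStepLeft, pvStepLeft]
        have hlt : t.length < n := by
          rw [← hn, ← ht]
          simp only [List.length_append, leftTok, List.length_cons, List.length_nil]
          omega
        have hsuf : t ++ [c] <:+ (a :: xs) ++ [c] := by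
          rw [← ht, List.append_assoc]; exact leftTok.suffix_append _
        rw [ih t.length hlt t rfl
              (fun hx => hsl (hx.trans hsuf)) (fun hx => hsr (hx.trans hsuf))]
        simp
      · by_cases hR : rightTok <+: (a :: xs)
        · obtain ⟨t, ht⟩ := hR
          rw [← ht, List.append_assoc, pvStepRight, pvStepRight]
          have hlt : t.length < n := by
            rw [← hn, ← ht]
            simp only [List.length_append, rightTok, List.length_cons, List.length_nil]
            omega
          have hsuf : t ++ [c] <:+ (a :: xs) ++ [c] := by
            rw [← ht, List.append_assoc]; exact rightTok.suffix_append _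
          rw [ih t.length hlt t rfl
                (fun hx => hsl (hx.trans hsuf)) (fun hx => hsr (hx.trans hsuf))]
          simp
        · have hnL1 : ¬ leftTok <+: (a :: xs) ++ [c] := fun hp =>
            hL (pvPrefixSnoc leftTok (a :: xs) c hsl hp)
          have hnR1 : ¬ rightTok <+: (a :: xs) ++ [c] := fun hp =>
            hR (pvPrefixSnoc rightTok (a :: xs) c hsr hp)
          rw [List.cons_append,
              pvStepChar a (xs ++ [c]) (by rwa [← List.cons_append]) (by rwa [← List.cons_append]),
              pvStepChar a xs hL hR]
          have hlt : xs.length < n := by rw [← hn]; simp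
          have hsuf : xs ++ [c] <:+ (a :: xs) ++ [c] := by
            rw [show (a :: xs) ++ [c] = [a] ++ (xs ++ [c]) by simp]
            exact List.suffix_append _ _
          rw [ih xs.length hlt xs rfl
                (fun hx => hsl (hx.trans hsuf)) (fun hx => hsr (hx.trans hsuf))]
          simp

-- B's accumulator appends on the right
theorem pvAltAcc : ∀ fuel (l : List Char), l.length ≤ fuel → ∀ acc,
    iterCharsAltGo fuel l acc = acc ++ iterCharsAltGo fuel l [] := by
  intro fuel
  induction fuel with
  | zero =>
    intro l hl acc
    match l with
    | [] => simp [iterCharsAltGo]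
  | succ fuel ih =>
    intro l hl acc
    match l with
    | [] => simp [iterCharsAltGo]
    | a :: rest =>
      have hlen : (a :: rest).length = rest.length + 1 := by simp
      cases h1 : PySem.Chars.endswith (a :: rest) leftTok with
      | true =>
        rw [pvAltStepLeft fuel a rest acc h1, pvAltStepLeft fuel a rest [] h1]
        have hle : (PySem.List.slice (a :: rest) none (some (-5))).length ≤ fuel := by
          rw [pvSliceNegTake _ _ (by decide)]
          simp only [List.length_take]
          simp at hl
          omega
        rw [ih _ hle (acc ++ ["\\left"]), ih _ hle ([] ++ ["\\left"])]
        simp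
      | false =>
        cases h2 : PySem.Chars.endswith (a :: rest) rightTok with
        | true =>
          rw [pvAltStepRight fuel a rest acc h1 h2, pvAltStepRight fuel a rest [] h1 h2]
          have hle : (PySem.List.slice (a :: rest) none (some (-6))).length ≤ fuel := by
            rw [pvSliceNegTake _ _ (by decide)]
            simp only [List.length_take]
            simp at hl
            omega
          rw [ih _ hle (acc ++ ["\\right"]), ih _ hle ([] ++ ["\\right"])]
          simp
        | false =>
          obtain ⟨x, c, hx⟩ : ∃ x c, a :: rest = x ++ [c] := by
            rcases List.eq_nil_or_concat (a :: rest) with h | ⟨x, c, h⟩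
            · simp at h
            · exact ⟨x, c, by simpa [List.concat_eq_append] using h⟩
          have hget : PySem.List.pyGet? (a :: rest) (-1) = some c := by
            rw [hx]
            simp [PySem.List.pyGet?, PySem.List.pyIdx?]
          rw [pvAltStepChar fuel a rest acc c h1 h2 hget, pvAltStepChar fuel a rest [] c h1 h2 hget]
          have hle : (PySem.List.slice (a :: rest) none (some (-1))).length ≤ fuel := by
            rw [pvSliceNegTake _ _ (by decide)]
            simp only [List.length_take]
            simp at hl
            omega
          rw [ih _ hle (acc ++ [String.ofList [c]]), ih _ hle ([] ++ [String.ofList [c]])]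
          simp

-- the two tokenizers agree
theorem pvMain : ∀ fuel (l : List Char), l.length ≤ fuel →
    (iterCharsAltGo fuel l []).reverse = iterCharsGo l := by
  intro fuel
  induction fuel with
  | zero =>
    intro l hl
    match l with
    | [] => simp [iterCharsAltGo, iterCharsGo]
  | succ fuel ih =>
    intro l hl
    match l with
    | [] => simp [iterCharsAltGo, iterCharsGo]
    | a :: rest =>
      by_cases hL : leftTok <:+ (a :: rest)
      · obtain ⟨x, hx⟩ := hL
        rw [pvAltStepLeft fuel a rest [] (by rw [PySem.Chars.endswith_iff]; exact ⟨x, hx⟩)]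
        have hsl : PySem.List.slice (a :: rest) none (some (-5)) = x := by
          rw [← hx]; exact pvSliceOfSuffix x leftTok 5 (by simp [leftTok]) (by decide)
        have hxlen : x.length + 5 = (a :: rest).length := by
          rw [← hx]; simp [leftTok]
        rw [hsl, pvAltAcc fuel x (by simp only [List.length_cons] at hl hxlen; omega) _]
        rw [List.reverse_append, ih x (by simp only [List.length_cons] at hl hxlen; omega),
            ← hx, pvGoAppend leftTok (Or.inr (by simp [leftTok])) x.length x rfl]
        have hgl : iterCharsGo leftTok = ["\\left"] := rfl
        rw [hgl]
        simp
      · by_cases hR : rightTok <:+ (a :: rest)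
        · obtain ⟨x, hx⟩ := hR
          rw [pvAltStepRight fuel a rest []
                (by rw [Bool.eq_false_iff, Ne, PySem.Chars.endswith_iff]; exact hL)
                (by rw [PySem.Chars.endswith_iff]; exact ⟨x, hx⟩)]
          have hsl : PySem.List.slice (a :: rest) none (some (-6)) = x := by
            rw [← hx]; exact pvSliceOfSuffix x rightTok 6 (by simp [rightTok]) (by decide)
          have hxlen : x.length + 6 = (a :: rest).length := by
            rw [← hx]; simp [rightTok]
          rw [hsl, pvAltAcc fuel x (by simp only [List.length_cons] at hl hxlen; omega) _]
          rw [List.reverse_append, ih x (by simp only [List.length_cons] at hl hxlen; omega),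
              ← hx, pvGoAppend rightTok (Or.inr (by simp [rightTok])) x.length x rfl]
          have hgr : iterCharsGo rightTok = ["\\right"] := rfl
          rw [hgr]
          simp
        · obtain ⟨x, c, hx⟩ : ∃ x c, a :: rest = x ++ [c] := by
            rcases List.eq_nil_or_concat (a :: rest) with h | ⟨x, c, h⟩
            · simp at h
            · exact ⟨x, c, by simpa [List.concat_eq_append] using h⟩
          have hget : PySem.List.pyGet? (a :: rest) (-1) = some c := by
            rw [hx]
            simp [PySem.List.pyGet?, PySem.List.pyIdx?]
          rw [pvAltStepChar fuel a rest [] c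
                (by rw [Bool.eq_false_iff, Ne, PySem.Chars.endswith_iff]; exact hL)
                (by rw [Bool.eq_false_iff, Ne, PySem.Chars.endswith_iff]; exact hR) hget]
          have hsl : PySem.List.slice (a :: rest) none (some (-1)) = x := by
            rw [hx]; exact pvSliceOfSuffix x [c] 1 (by simp) (by decide)
          have hxlen : x.length + 1 = (a :: rest).length := by
            rw [hx]; simp
          rw [hsl, pvAltAcc fuel x (by simp only [List.length_cons] at hl hxlen; omega) _]
          rw [List.reverse_append, ih x (by simp only [List.length_cons] at hl hxlen; omega), hx,
              pvGoSnoc c x.length x rfl (by rw [← hx]; exact hL) (by rw [← hx]; exact hR)]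
          simp

-- ===== VERDICT (by name: the statement is the Claim_ definition above) =====
theorem iter_chars_py_spec : Claim_equal_iter_chars_py := by
  intro content _
  unfold Spec_iter_chars_py iter_chars_py iter_chars_py_alt
  exact (pvMain content.toList.length content.toList (le_refl _)).symm
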